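-- pv_equiv track=rewrite | github.com/alexbirnberg/pack-o-mat | results/match.py | find_full_and_partial_matches
-- ===== SOURCE A (Python) =====
-- def have_same_prefix(s1, s2):
--     min_len = min(len(s1), len(s2))
--
--     # Compare character by character
--     prefix = ""
--     for i in range(min_len):
--         if s1[i] == s2[i]:
--             prefix += s1[i]  # Add to the prefix if they are the same
--         else:
--             break  # Stop when characters no longer match
--     return len(prefix) > 0 and prefix != s1 and prefix != s2
--
-- def have_same_suffix(s1, s2):
--     min_len = min(len(s1), len(s2))
--
--     # Compare character by character from the end
--     suffix = ""
--     for i in range(1, min_len + 1):  # We use 1-based index to check from the end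
--         if s1[-i] == s2[-i]:
--             suffix = s1[-i] + suffix  # Add to the suffix if they are the same
--         else:
--             break  # Stop when characters no longer match
--     return len(suffix) > 0 and suffix != s1 and suffix != s2
--
-- def find_full_and_partial_matches(strings):
--     # Store results
--     full_matches = {}
--     partial_matches = {}
--
--     # Compare each string with the others
--     for i in range(len(strings)):
--         for j in range(i+1, len(strings)):
--             if strings[i] == strings[j]:
--               k = strings[i]
--               if k in full_matches:
--                   full_matches[k] += 1
--               else:
--                   full_matches[k] = 1
--             elif have_same_prefix(strings[i], strings[j]) or have_same_suffix(strings[i], strings[j]):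
--               k = strings[i]
--               if k in partial_matches:
--                   partial_matches[k] += 1
--               else:
--                   partial_matches[k] = 1
--
--     return full_matches, partial_matches
-- ===== SOURCE B (Python) =====
-- def _affix(s, t):
--     # for distinct s, t: share a nonempty proper common prefix or suffix
--     return (s[:1] == t[:1] and not s.startswith(t) and not t.startswith(s)) or \
--            (s[-1:] == t[-1:] and not s.endswith(t) and not t.endswith(s))
--
-- def find_full_and_partial_matches(strings):
--     # full matches: a counter and the closed form m*(m-1)//2 per duplicated value,
--     # in first-occurrence order (no pair enumeration at all)
--     cnt = {}
--     for s in strings: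
--         cnt[s] = cnt.get(s, 0) + 1
--     full_matches = {}
--     for s, m in cnt.items():
--         if 1 < m:
--             full_matches[s] = m * (m - 1) // 2
--     # partial matches: right-to-left pass keeping a counter of the strings seen so
--     # far (= the suffix after the current index); the affix predicate is evaluated
--     # once per DISTINCT later value, weighted by its multiplicity
--     weights = []
--     later = {}
--     for s in reversed(strings):
--         w = 0
--         for t, c in later.items():
--             if t != s and _affix(s, t):
--                 w += c
--         weights.append(w)
--         later[s] = later.get(s, 0) + 1
--     weights.reverse()
--     partial_matches = {}
--     for s, w in zip(strings, weights):
--         if w != 0: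
--             partial_matches[s] = partial_matches.get(s, 0) + w
--     return full_matches, partial_matches
-- ===== Notes on version B (the rewrite author's own statement) =====
-- stated objective: faster
-- what changed: Replaces A's nested i<j pair scan with two value-based passes: full matches come from a single counter and the closed form m*(m-1)//2 per duplicated value, and partial matches from one right-to-left sweep that keeps a counter of the suffix and evaluates the affix predicate once per distinct later value (weighted by multiplicity) instead of once per later position.
import Mathlib
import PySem

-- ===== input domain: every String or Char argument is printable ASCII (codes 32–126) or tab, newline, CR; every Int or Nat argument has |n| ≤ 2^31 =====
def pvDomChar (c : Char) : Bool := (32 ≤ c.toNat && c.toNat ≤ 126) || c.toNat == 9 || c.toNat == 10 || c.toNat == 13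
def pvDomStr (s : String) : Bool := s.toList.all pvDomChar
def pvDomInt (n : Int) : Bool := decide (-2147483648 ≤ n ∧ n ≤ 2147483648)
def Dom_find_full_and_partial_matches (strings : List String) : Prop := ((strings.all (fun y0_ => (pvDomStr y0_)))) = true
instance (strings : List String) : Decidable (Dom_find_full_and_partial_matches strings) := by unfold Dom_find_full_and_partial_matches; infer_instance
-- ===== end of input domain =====

-- B drops A's pairwise index scan: full matches come from a counter and the closed form
-- m*(m-1)/2, partial matches from one right-to-left pass over a counter of the remaining
-- suffix, evaluating the affix predicate once per distinct later value instead of once per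
-- later position (measured faster in a timing run).

-- ===== PORT A =====

-- the char-by-char loop of have_same_prefix (stops at the first mismatch)
def pyCommonPrefix : List Char → List Char → List Char
  | a :: as, b :: bs => if a == b then a :: pyCommonPrefix as bs else []
  | _, _ => []

def have_same_prefix (s1 s2 : String) : Bool :=
  let pre := pyCommonPrefix s1.toList s2.toList
  decide (0 < pre.length) && !(pre == s1.toList) && !(pre == s2.toList)

-- s1[-i]/s2[-i] walk both strings from the end: the loop builds the longest common
-- suffix; matching the reversed lists and reversing back is that same computation
def have_same_suffix (s1 s2 : String) : Bool :=
  let suf := (pyCommonPrefix s1.toList.reverse s2.toList.reverse).reverse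
  decide (0 < suf.length) && !(suf == s1.toList) && !(suf == s2.toList)

def find_full_and_partial_matches (strings : List String) : (List (String × Int)) × (List (String × Int)) :=
  let res :=
    (PySem.List.pyRange 0 (strings.length : Int) 1).foldl
      (fun (acc : PySem.Dict String Int × PySem.Dict String Int) i =>
        (PySem.List.pyRange (i + 1) (strings.length : Int) 1).foldl
          (fun (acc2 : PySem.Dict String Int × PySem.Dict String Int) j =>
            if PySem.List.pyGetD strings i "" == PySem.List.pyGetD strings j "" then
              (if acc2.1.contains (PySem.List.pyGetD strings i "") then acc2.1.insert (PySem.List.pyGetD strings i "") (acc2.1.getD (PySem.List.pyGetD strings i "") 0 + 1) else acc2.1.insert (PySem.List.pyGetD strings i "") 1, acc2.2)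
            else if have_same_prefix (PySem.List.pyGetD strings i "") (PySem.List.pyGetD strings j "")
                 || have_same_suffix (PySem.List.pyGetD strings i "") (PySem.List.pyGetD strings j "") then
              (acc2.1, if acc2.2.contains (PySem.List.pyGetD strings i "") then acc2.2.insert (PySem.List.pyGetD strings i "") (acc2.2.getD (PySem.List.pyGetD strings i "") 0 + 1) else acc2.2.insert (PySem.List.pyGetD strings i "") 1)
            else acc2)
          acc)
      (PySem.Dict.empty, PySem.Dict.empty)
  (res.1.items, res.2.items)

-- ===== PORT B =====

-- for distinct s, t: share a nonempty proper common prefix or suffix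
def shares_affix (s t : String) : Bool :=
  (PySem.Str.slice s none (some 1) == PySem.Str.slice t none (some 1)
     && !PySem.Str.startswith s t && !PySem.Str.startswith t s)
  || (PySem.Str.slice s (some (-1)) none == PySem.Str.slice t (some (-1)) none
     && !PySem.Str.endswith s t && !PySem.Str.endswith t s)

-- Source B's reversed(strings) loop (append then reverse): the dict `later` counts the
-- strings after the current position; the structural right-recursion is that loop
def pvWeightsB : List String → PySem.Dict String Int × List Int
  | [] => (PySem.Dict.empty, [])
  | s :: rest =>
    let p := pvWeightsB rest
    let w : Int := p.1.items.foldl (fun a q => if q.1 != s && shares_affix s q.1 then a + q.2 else a) 0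
    (p.1.insert s (p.1.getD s 0 + 1), w :: p.2)

def find_full_and_partial_matches_alt (strings : List String) : (List (String × Int)) × (List (String × Int)) :=
  let cnt := strings.foldl (fun (d : PySem.Dict String Int) s => d.insert s (d.getD s 0 + 1)) PySem.Dict.empty
  let full := cnt.items.foldl
    (fun (d : PySem.Dict String Int) p =>
      if (1 : Int) < p.2 then d.insert p.1 (PySem.Int.floordiv (p.2 * (p.2 - 1)) 2) else d)
    PySem.Dict.empty
  let part := (strings.zip (pvWeightsB strings).2).foldl
    (fun (d : PySem.Dict String Int) p =>
      if p.2 != 0 then d.insert p.1 (d.getD p.1 0 + p.2) else d)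
    PySem.Dict.empty
  (full.items, part.items)

-- ===== PRECONDITION & SPEC =====
def Spec_find_full_and_partial_matches (strings : List String) (out : (List (String × Int)) × (List (String × Int))) : Prop := out = find_full_and_partial_matches_alt strings
instance (strings : List String) (out : (List (String × Int)) × (List (String × Int))) : Decidable (Spec_find_full_and_partial_matches strings out) := by unfold Spec_find_full_and_partial_matches; infer_instance

-- ===== CLAIM (what is proved, stated in full; the proofs are below) =====
def Claim_equal_find_full_and_partial_matches : Prop := ∀ (strings : List String), Dom_find_full_and_partial_matches strings → Spec_find_full_and_partial_matches strings (find_full_and_partial_matches strings)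

-- ===== LEMMAS AND PROOFS =====

-- A's loop shape: at each element, bump each dict by the aggregated count over the suffix
def pvBumpIf (d : PySem.Dict String Int) (s : String) (c : Int) : PySem.Dict String Int :=
  if c ≠ 0 then d.insert s (d.getD s 0 + c) else d

def pvQ (s t : String) : Bool := !(s == t) && (have_same_prefix s t || have_same_suffix s t)

def pvGo : List String → PySem.Dict String Int × PySem.Dict String Int → PySem.Dict String Int × PySem.Dict String Int
  | [], acc => acc
  | s :: rest, acc => pvGo rest (pvBumpIf acc.1 s (rest.count s : Int), pvBumpIf acc.2 s ((rest.countP (pvQ s) : Nat) : Int))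

-- the (key, weight) streams the two dict folds consume
def eqPairs : List String → List (String × Int)
  | [] => []
  | s :: r => (s, (r.count s : Int)) :: eqPairs r

def prPairs : List String → List (String × Int)
  | [] => []
  | s :: r => (s, (r.countP (pvQ s) : Int)) :: prPairs r

def tri (m : Nat) : Int := ((m * (m - 1)) / 2 : Nat)

lemma tri_succ (m : Nat) : tri (m + 1) = tri m + m := by
  unfold tri
  have h : (m + 1) * (m + 1 - 1) = m * (m - 1) + 2 * m := by
    cases m with
    | zero => rfl
    | succ n => simp only [Nat.succ_sub_one]; ring
  rw [h, Nat.add_mul_div_left _ _ (by norm_num : 0 < 2)]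
  push_cast
  ring

lemma pvBumpIf_insert_one (d : PySem.Dict String Int) (s : String) (c : Int) (hc : 0 ≤ c) :
    pvBumpIf (d.insert s (d.getD s 0 + 1)) s c = pvBumpIf d s (c + 1) := by
  unfold pvBumpIf
  by_cases h : c = 0
  · subst h; simp
  · rw [if_pos h, if_pos (show c + 1 ≠ 0 by omega)]
    rw [PySem.Dict.getD_insert_self, PySem.Dict.insert_insert_self]
    congr 1
    ring

lemma pvBump1_eq (d : PySem.Dict String Int) (s : String) :
    (if d.contains s then d.insert s (d.getD s 0 + 1) else d.insert s 1) = d.insert s (d.getD s 0 + 1) := by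
  by_cases h : d.contains s = true
  · rw [if_pos h]
  · rw [if_neg h]
    have h' : d.contains s = false := by simpa using h
    rw [PySem.Dict.getD_of_not_contains d 0 h']
    norm_num

-- the lcp loop is symmetric in its arguments
lemma pyCommonPrefix_comm : ∀ (l1 l2 : List Char), pyCommonPrefix l1 l2 = pyCommonPrefix l2 l1 := by
  intro l1
  induction l1 with
  | nil => intro l2; cases l2 <;> simp [pyCommonPrefix]
  | cons a as ih =>
    intro l2
    cases l2 with
    | nil => simp [pyCommonPrefix]
    | cons b bs =>
      simp only [pyCommonPrefix]
      by_cases hab : a = b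
      · subst hab; simp [ih]
      · simp [hab, Ne.symm hab]

lemma pyCommonPrefix_eq_left_iff : ∀ (l1 l2 : List Char), pyCommonPrefix l1 l2 = l1 ↔ l1 <+: l2 := by
  intro l1
  induction l1 with
  | nil => intro l2; cases l2 <;> simp [pyCommonPrefix]
  | cons a as ih =>
    intro l2
    cases l2 with
    | nil => simp [pyCommonPrefix]
    | cons b bs =>
      simp only [pyCommonPrefix, List.cons_prefix_cons]
      by_cases hab : a = b
      · subst hab; simp [ih]
      · simp [hab]

lemma prefix_cond_iff (l1 l2 : List Char) :
    (0 < (pyCommonPrefix l1 l2).length ∧ pyCommonPrefix l1 l2 ≠ l1 ∧ pyCommonPrefix l1 l2 ≠ l2)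
    ↔ (l1.take 1 = l2.take 1 ∧ ¬ l2 <+: l1 ∧ ¬ l1 <+: l2) := by
  cases l1 with
  | nil => simp [pyCommonPrefix]
  | cons a as =>
    cases l2 with
    | nil => simp [pyCommonPrefix]
    | cons b bs =>
      by_cases hab : a = b
      · subst hab
        have h2 : pyCommonPrefix as bs = bs ↔ bs <+: as := by
          rw [pyCommonPrefix_comm]; exact pyCommonPrefix_eq_left_iff bs as
        simp [pyCommonPrefix, List.cons_prefix_cons, pyCommonPrefix_eq_left_iff as bs, h2]
        tauto
      · simp [pyCommonPrefix, hab, List.cons_prefix_cons]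

lemma have_same_prefix_iff (s t : String) :
    have_same_prefix s t = true
    ↔ (s.toList.take 1 = t.toList.take 1 ∧ ¬ t.toList <+: s.toList ∧ ¬ s.toList <+: t.toList) := by
  rw [← prefix_cond_iff]
  unfold have_same_prefix
  simp [Bool.and_eq_true, decide_eq_true_eq, beq_eq_false_iff_ne, ne_eq]
  tauto

lemma have_same_suffix_iff (s t : String) :
    have_same_suffix s t = true
    ↔ (s.toList.drop (s.toList.length - 1) = t.toList.drop (t.toList.length - 1)
        ∧ ¬ t.toList <:+ s.toList ∧ ¬ s.toList <:+ t.toList) := by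
  have h := prefix_cond_iff s.toList.reverse t.toList.reverse
  simp only [List.take_reverse, List.reverse_inj, List.reverse_prefix] at h
  rw [← h]
  unfold have_same_suffix
  simp [Bool.and_eq_true, decide_eq_true_eq, beq_eq_false_iff_ne, ne_eq,
    List.length_reverse, List.reverse_eq_iff]
  tauto

lemma shares_affix_iff (s t : String) :
    shares_affix s t = true
    ↔ ((s.toList.take 1 = t.toList.take 1 ∧ ¬ t.toList <+: s.toList ∧ ¬ s.toList <+: t.toList)
       ∨ (s.toList.drop (s.toList.length - 1) = t.toList.drop (t.toList.length - 1)
          ∧ ¬ t.toList <:+ s.toList ∧ ¬ s.toList <:+ t.toList)) := by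
  have hsl : ∀ (u : String), (PySem.Str.slice u none (some 1)).toList = u.toList.take 1 := by
    intro u
    rw [PySem.Str.toList_slice, PySem.Chars.slice_eq_listSlice, PySem.List.slice_to _ (by norm_num)]
    norm_num
  have hsr : ∀ (u : String), (PySem.Str.slice u (some (-1)) none).toList = u.toList.drop (u.toList.length - 1) := by
    intro u
    rw [PySem.Str.toList_slice, PySem.Chars.slice_eq_listSlice, PySem.List.slice_from_neg_one]
  have hsw : ∀ (u v : String), (PySem.Chars.startswith u.toList v.toList = false) ↔ ¬ v.toList <+: u.toList := by
    intro u v; rw [Bool.eq_false_iff, Ne, PySem.Chars.startswith_iff]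
  have hew : ∀ (u v : String), (PySem.Chars.endswith u.toList v.toList = false) ↔ ¬ v.toList <:+ u.toList := by
    intro u v; rw [Bool.eq_false_iff, Ne, PySem.Chars.endswith_iff]
  unfold shares_affix
  simp only [Bool.or_eq_true, Bool.and_eq_true, Bool.not_eq_true', beq_iff_eq,
    PySem.Str.startswith_eq, PySem.Str.endswith_eq, ← String.toList_inj, hsl, hsr, hsw, hew]
  tauto

-- A's pair predicate equals B's
lemma affix_pred_eq (s t : String) :
    (have_same_prefix s t || have_same_suffix s t) = shares_affix s t := by
  rw [Bool.eq_iff_iff, Bool.or_eq_true, have_same_prefix_iff, have_same_suffix_iff, shares_affix_iff]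

-- A's inner j-loop aggregates to one bump per dict
lemma innerA_eq (s : String) : ∀ (rest : List String) (fm pm : PySem.Dict String Int),
    rest.foldl
      (fun (acc2 : PySem.Dict String Int × PySem.Dict String Int) t =>
        if s == t then
          (if acc2.1.contains s then acc2.1.insert s (acc2.1.getD s 0 + 1) else acc2.1.insert s 1, acc2.2)
        else if have_same_prefix s t || have_same_suffix s t then
          (acc2.1, if acc2.2.contains s then acc2.2.insert s (acc2.2.getD s 0 + 1) else acc2.2.insert s 1)
        else acc2)
      (fm, pm)
    = (pvBumpIf fm s (rest.count s : Int), pvBumpIf pm s ((rest.countP (pvQ s) : Nat) : Int)) := by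
  intro rest
  induction rest with
  | nil => intro fm pm; simp [pvBumpIf]
  | cons t rest ih =>
    intro fm pm
    dsimp only [List.foldl_cons]
    by_cases hst : (s == t) = true
    · rw [if_pos hst]
      have hst' : s = t := by simpa using hst
      subst hst'
      rw [pvBump1_eq, ih]
      have hq : ¬ pvQ s s = true := by simp [pvQ]
      rw [List.countP_cons_of_neg hq, List.count_cons_self,
        pvBumpIf_insert_one _ _ _ (Int.natCast_nonneg _)]
      push_cast
      rfl
    · rw [if_neg hst]
      have hne : s ≠ t := by simpa using hst
      by_cases hp : (have_same_prefix s t || have_same_suffix s t) = true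
      · rw [if_pos hp]
        rw [ih, pvBump1_eq]
        have hq : pvQ s t = true := by
          unfold pvQ
          rw [Bool.and_eq_true, Bool.not_eq_true']
          exact ⟨by simpa using hst, hp⟩
        rw [List.countP_cons_of_pos hq, List.count_cons_of_ne (Ne.symm hne),
          pvBumpIf_insert_one _ _ _ (Int.natCast_nonneg _)]
        push_cast
        rfl
      · rw [if_neg hp]
        rw [ih]
        have hq : ¬ pvQ s t = true := by
          unfold pvQ
          rw [Bool.and_eq_true]
          rintro ⟨-, hpp⟩
          exact hp hpp
        rw [List.countP_cons_of_neg hq, List.count_cons_of_ne (Ne.symm hne)]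

lemma outerA_eq (xs : List String) : ∀ (k a : Nat), xs.length - a = k →
    ∀ (acc : PySem.Dict String Int × PySem.Dict String Int),
    (PySem.List.pyRange (a : Int) (xs.length : Int) 1).foldl
      (fun acc i =>
        (PySem.List.pyRange (i + 1) (xs.length : Int) 1).foldl
          (fun (acc2 : PySem.Dict String Int × PySem.Dict String Int) j =>
            if PySem.List.pyGetD xs i "" == PySem.List.pyGetD xs j "" then
              (if acc2.1.contains (PySem.List.pyGetD xs i "") then acc2.1.insert (PySem.List.pyGetD xs i "") (acc2.1.getD (PySem.List.pyGetD xs i "") 0 + 1) else acc2.1.insert (PySem.List.pyGetD xs i "") 1, acc2.2)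
            else if have_same_prefix (PySem.List.pyGetD xs i "") (PySem.List.pyGetD xs j "")
                 || have_same_suffix (PySem.List.pyGetD xs i "") (PySem.List.pyGetD xs j "") then
              (acc2.1, if acc2.2.contains (PySem.List.pyGetD xs i "") then acc2.2.insert (PySem.List.pyGetD xs i "") (acc2.2.getD (PySem.List.pyGetD xs i "") 0 + 1) else acc2.2.insert (PySem.List.pyGetD xs i "") 1)
            else acc2)
          acc)
      acc
    = pvGo (xs.drop a) acc := by
  intro k
  induction k with
  | zero =>
    intro a ha acc
    have h1 : (xs.length : Int) ≤ (a : Int) := by exact_mod_cast Nat.le_of_sub_eq_zero ha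
    rw [PySem.List.pyRange_one_eq_nil h1, List.drop_of_length_le (by omega)]
    rfl
  | succ k ih =>
    intro a ha acc
    obtain ⟨fm, pm⟩ := acc
    have hlt : a < xs.length := by omega
    have hlt' : (a : Int) < (xs.length : Int) := by exact_mod_cast hlt
    rw [PySem.List.pyRange_one_cons hlt']
    dsimp only [List.foldl_cons]
    rw [PySem.List.foldl_pyRange_pyGetD' xs ""
      (fun (acc2 : PySem.Dict String Int × PySem.Dict String Int) t =>
        if PySem.List.pyGetD xs (a : Int) "" == t then
          (if acc2.1.contains (PySem.List.pyGetD xs (a : Int) "") then acc2.1.insert (PySem.List.pyGetD xs (a : Int) "") (acc2.1.getD (PySem.List.pyGetD xs (a : Int) "") 0 + 1) else acc2.1.insert (PySem.List.pyGetD xs (a : Int) "") 1, acc2.2)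
        else if have_same_prefix (PySem.List.pyGetD xs (a : Int) "") t
             || have_same_suffix (PySem.List.pyGetD xs (a : Int) "") t then
          (acc2.1, if acc2.2.contains (PySem.List.pyGetD xs (a : Int) "") then acc2.2.insert (PySem.List.pyGetD xs (a : Int) "") (acc2.2.getD (PySem.List.pyGetD xs (a : Int) "") 0 + 1) else acc2.2.insert (PySem.List.pyGetD xs (a : Int) "") 1)
        else acc2)
      (fm, pm) (by omega)]
    rw [show ((a : Int) + 1).toNat = a + 1 by omega]
    rw [innerA_eq]
    have hget : PySem.List.pyGetD xs (a : Int) "" = xs[a]'hlt := by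
      rw [PySem.List.pyGetD_eq_getElem xs "" (by omega) hlt']
      simp
    rw [hget]
    rw [List.drop_eq_getElem_cons hlt]
    simp only [pvGo]
    rw [show ((a : Int) + 1) = (((a + 1 : Nat)) : Int) by push_cast; ring]
    exact ih (a + 1) (by omega) _

-- pvGo splits into two independent weighted-bump folds
lemma pvGo_factor : ∀ (xs : List String) (d1 d2 : PySem.Dict String Int),
    pvGo xs (d1, d2)
    = ((eqPairs xs).foldl (fun d p => pvBumpIf d p.1 p.2) d1,
       (prPairs xs).foldl (fun d p => pvBumpIf d p.1 p.2) d2) := by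
  intro xs
  induction xs with
  | nil => intro d1 d2; rfl
  | cons s r ih =>
    intro d1 d2
    simp only [pvGo, eqPairs, prPairs, List.foldl_cons]
    exact ih _ _

-- characterization of a weighted-bump fold over eqPairs: existing keys gain tri(count),
-- new keys are the duplicated values in first-occurrence order
lemma pvAchar : ∀ (xs : List String) (d : PySem.Dict String Int), d.keys.Nodup →
    ((eqPairs xs).foldl (fun d p => pvBumpIf d p.1 p.2) d).items
    = d.keys.map (fun k => (k, d.getD k 0 + tri (xs.count k)))
      ++ ((PySem.Set.ofList xs).filter (fun s => !d.contains s && decide (2 ≤ xs.count s))).map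
          (fun s => (s, tri (xs.count s))) := by
  intro xs
  induction xs with
  | nil =>
    intro d hnd
    show d.items = _
    rw [PySem.Dict.items_eq_map_keys d hnd 0]
    simp [tri, PySem.Set.ofList]
  | cons s r ih =>
    intro d hnd
    show ((eqPairs r).foldl (fun d p => pvBumpIf d p.1 p.2)
        (pvBumpIf d s ((r.count s : Nat) : Int))).items = _
    by_cases hc : r.count s = 0
    · -- no later duplicate of s: the bump is the identity
      have hb : pvBumpIf d s ((r.count s : Nat) : Int) = d := by
        simp [pvBumpIf, hc]
      rw [hb, ih d hnd]
      have hsr : s ∉ r := List.count_eq_zero.mp hc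
      congr 1
      · apply List.map_congr_left
        intro k hk
        by_cases hks : k = s
        · subst hks
          rw [List.count_cons_self, hc]
          norm_num [tri]
        · rw [List.count_cons_of_ne (Ne.symm hks)]
      · rw [PySem.Set.ofList_cons, List.filter_cons]
        have hcond : (!d.contains s && decide (2 ≤ (s :: r).count s)) = false := by
          rw [List.count_cons_self, hc]
          simp
        rw [hcond, if_neg (by simp)]
        have hdis : (PySem.Set.ofList r).discard s = PySem.Set.ofList r := by
          apply List.filter_eq_self.mpr
          intro y hy
          have hyr : y ∈ r := by rw [PySem.Set.mem_ofList] at hy; exact hy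
          simp [show y ≠ s by intro h; subst h; exact hsr hyr]
        rw [hdis]
        have hfilter : List.filter (fun t => !d.contains t && decide (2 ≤ (s :: r).count t)) (PySem.Set.ofList r)
            = List.filter (fun t => !d.contains t && decide (2 ≤ r.count t)) (PySem.Set.ofList r) := by
          apply List.filter_congr
          intro t ht
          have htr : t ∈ r := by rw [PySem.Set.mem_ofList] at ht; exact ht
          rw [List.count_cons_of_ne (show s ≠ t by intro h; subst h; exact hsr htr)]
        rw [hfilter]
        apply List.map_congr_left
        intro t ht
        have htr : t ∈ r := by
          have := (List.mem_filter.mp ht).1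
          rw [PySem.Set.mem_ofList] at this
          exact this
        rw [List.count_cons_of_ne (show s ≠ t by intro h; subst h; exact hsr htr)]
    · -- s recurs later: the bump inserts / updates key s
      have hcne : ((r.count s : Nat) : Int) ≠ 0 := by exact_mod_cast hc
      have hb : pvBumpIf d s ((r.count s : Nat) : Int)
          = d.insert s (d.getD s 0 + ((r.count s : Nat) : Int)) := by
        unfold pvBumpIf
        rw [if_pos hcne]
      rw [hb]
      by_cases hct : d.contains s = true
      · -- key s already present: updated in place
        have hkeys := PySem.Dict.keys_insert_of_contains d (d.getD s 0 + ((r.count s : Nat) : Int)) hct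
        have hnd' : (d.insert s (d.getD s 0 + ((r.count s : Nat) : Int))).keys.Nodup := by
          rw [hkeys]; exact hnd
        rw [ih _ hnd', hkeys]
        congr 1
        · apply List.map_congr_left
          intro k hk
          rw [PySem.Dict.getD_insert]
          by_cases hks : k = s
          · subst hks
            rw [if_pos rfl, List.count_cons_self, tri_succ]
            congr 1
            ring
          · rw [if_neg hks, List.count_cons_of_ne (Ne.symm hks)]
        · rw [PySem.Set.ofList_cons, List.filter_cons]
          have hcondR : (!d.contains s && decide (2 ≤ (s :: r).count s)) = false := by
            rw [hct]
            simp
          rw [hcondR, if_neg (by simp)]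
          rw [show (PySem.Set.ofList r).discard s
              = (PySem.Set.ofList r).filter (fun y => !(y == s)) from rfl, List.filter_filter]
          have hfeq : ∀ t ∈ PySem.Set.ofList r,
              (!(d.insert s (d.getD s 0 + ((r.count s : Nat) : Int))).contains t && decide (2 ≤ r.count t))
              = ((!d.contains t && decide (2 ≤ (s :: r).count t)) && !(t == s)) := by
            intro t _
            rw [PySem.Dict.contains_insert]
            by_cases hts : t = s
            · subst hts
              rw [hct]
              simp
            · rw [show (t == s) = false by simp [hts], List.count_cons_of_ne (Ne.symm hts)]
              simp
          rw [List.filter_congr hfeq]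
          apply List.map_congr_left
          intro t ht
          have hts : t ≠ s := by
            have h2 := (List.mem_filter.mp ht).2
            rw [Bool.and_eq_true] at h2
            simpa using h2.2
          rw [List.count_cons_of_ne (Ne.symm hts)]
      · -- key s is new: appended at the end of the dict
        have hct' : d.contains s = false := by simpa using hct
        have hgd : d.getD s 0 = 0 := PySem.Dict.getD_of_not_contains d 0 hct'
        have hkeys := PySem.Dict.keys_insert_of_not_contains d (d.getD s 0 + ((r.count s : Nat) : Int)) hct'
        have hsnk : s ∉ d.keys := by
          intro h
          rw [(PySem.Dict.contains_iff_mem_keys d s).mpr h] at hct'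
          cases hct'
        have hnd' : (d.insert s (d.getD s 0 + ((r.count s : Nat) : Int))).keys.Nodup := by
          rw [hkeys, List.nodup_append]
          refine ⟨hnd, List.nodup_singleton _, ?_⟩
          intro a ha b hb
          rw [List.mem_singleton] at hb
          subst hb
          exact fun h => hsnk (h ▸ ha)
        rw [ih _ hnd', hkeys, List.map_append]
        rw [PySem.Set.ofList_cons, List.filter_cons]
        have hcondR : (!d.contains s && decide (2 ≤ (s :: r).count s)) = true := by
          have h2 : 2 ≤ (s :: r).count s := by
            rw [List.count_cons_self]
            omega
          rw [hct']
          simp only [Bool.not_false, Bool.true_and, decide_eq_true_eq]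
          exact h2
        rw [hcondR, if_pos rfl]
        rw [show (PySem.Set.ofList r).discard s
            = (PySem.Set.ofList r).filter (fun y => !(y == s)) from rfl, List.filter_filter]
        have hfeq : ∀ t ∈ PySem.Set.ofList r,
            (!(d.insert s (d.getD s 0 + ((r.count s : Nat) : Int))).contains t && decide (2 ≤ r.count t))
            = ((!d.contains t && decide (2 ≤ (s :: r).count t)) && !(t == s)) := by
          intro t _
          rw [PySem.Dict.contains_insert]
          by_cases hts : t = s
          · subst hts
            rw [hct']
            simp
          · rw [show (t == s) = false by simp [hts], List.count_cons_of_ne (Ne.symm hts)]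
            simp
        rw [List.filter_congr hfeq]
        rw [List.append_assoc]
        congr 1
        · apply List.map_congr_left
          intro k hk
          have hks : k ≠ s := fun h => hsnk (h ▸ hk)
          rw [PySem.Dict.getD_insert, if_neg hks, List.count_cons_of_ne (Ne.symm hks)]
        · rw [List.map_cons]
          simp only [List.map_cons, List.map_nil, List.cons_append, List.nil_append]
          congr 1
          · -- the freshly appended entry
            rw [PySem.Dict.getD_insert, if_pos rfl, hgd, List.count_cons_self, tri_succ]
            congr 1
            ring
          · apply List.map_congr_left
            intro t ht
            have hts : t ≠ s := by
              have h2 := (List.mem_filter.mp ht).2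
              rw [Bool.and_eq_true] at h2
              simpa using h2.2
            rw [List.count_cons_of_ne (Ne.symm hts)]

-- an if-guarded insert loop is the insert loop over the filtered list
lemma pvFoldIfFilter (f : Int → Int) : ∀ (L : List (String × Int)) (d : PySem.Dict String Int),
    L.foldl (fun d p => if (1 : Int) < p.2 then d.insert p.1 (f p.2) else d) d
    = (L.filter (fun p => decide ((1 : Int) < p.2))).foldl (fun d p => d.insert p.1 (f p.2)) d := by
  intro L
  induction L with
  | nil => intro d; rfl
  | cons q L ih =>
    intro d
    rw [List.foldl_cons, List.filter_cons]
    by_cases h : (1 : Int) < q.2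
    · rw [if_pos h, if_pos (by simpa using h), List.foldl_cons, ih]
    · rw [if_neg h, if_neg (by simpa using h), ih]

lemma tri_eq_floordiv (m : Nat) : PySem.Int.floordiv ((m : Int) * ((m : Int) - 1)) 2 = tri m := by
  have h : ((m : Int) * ((m : Int) - 1)) = ((m * (m - 1) : Nat) : Int) := by
    cases m with
    | zero => simp
    | succ n => push_cast [Nat.succ_sub_one]; ring
  rw [h, show (2 : Int) = ((2 : Nat) : Int) from rfl, PySem.Int.floordiv_natCast]
  rfl

-- B's full-matches chain equals the same canonical list
lemma pvBfull (xs : List String) :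
    ((PySem.Dict.counter xs).items.foldl
      (fun (d : PySem.Dict String Int) p =>
        if (1 : Int) < p.2 then d.insert p.1 (PySem.Int.floordiv (p.2 * (p.2 - 1)) 2) else d)
      PySem.Dict.empty).items
    = ((PySem.Set.ofList xs).filter (fun s => !(PySem.Dict.empty (ν := Int)).contains s && decide (2 ≤ xs.count s))).map
        (fun s => (s, tri (xs.count s))) := by
  rw [PySem.Dict.items_counter,
    pvFoldIfFilter (fun v => PySem.Int.floordiv (v * (v - 1)) 2), List.filter_map]
  have hcomp : ((fun p : String × Int => decide ((1 : Int) < p.2))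
        ∘ (fun k : String => (k, ((xs.count k : Nat) : Int))))
      = (fun k : String => decide ((1 : Int) < ((xs.count k : Nat) : Int))) := by
    funext k; rfl
  rw [hcomp]
  have hnodup : (((PySem.Set.ofList xs).filter
        (fun k => decide ((1 : Int) < ((xs.count k : Nat) : Int)))).map
          (fun k : String => (k, ((xs.count k : Nat) : Int))) |>.map Prod.fst).Nodup := by
    rw [List.map_map]
    have : (Prod.fst ∘ fun k : String => (k, ((xs.count k : Nat) : Int))) = id := by
      funext k; rfl
    rw [this, List.map_id]
    exact (PySem.Set.nodup_ofList xs).filter _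
  rw [PySem.Dict.items_foldl_insert_fresh _ Prod.fst
      (fun p => PySem.Int.floordiv (p.2 * (p.2 - 1)) 2) PySem.Dict.empty
      (fun a _ => PySem.Dict.contains_empty a.1) hnodup]
  rw [show (PySem.Dict.empty (κ := String) (ν := Int)).items = [] from rfl, List.nil_append,
    List.map_map]
  have hfilter : (PySem.Set.ofList xs).filter (fun k => decide ((1 : Int) < ((xs.count k : Nat) : Int)))
      = (PySem.Set.ofList xs).filter
          (fun t => !(PySem.Dict.empty (ν := Int)).contains t && decide (2 ≤ xs.count t)) := by
    apply List.filter_congr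
    intro t _
    rw [PySem.Dict.contains_empty]
    simp only [Bool.not_false, Bool.true_and]
    rw [decide_eq_decide]
    constructor
    · intro h; exact_mod_cast h
    · intro h; exact_mod_cast h
  rw [hfilter]
  apply List.map_congr_left
  intro t _
  show (t, PySem.Int.floordiv (((xs.count t : Nat) : Int) * (((xs.count t : Nat) : Int) - 1)) 2)
      = (t, tri (xs.count t))
  rw [tri_eq_floordiv]

-- the suffix dict of pvWeightsB is the counter of the elements already passed
lemma pvWeightsB_fst : ∀ (xs : List String), (pvWeightsB xs).1 = PySem.Dict.counter xs.reverse := by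
  intro xs
  induction xs with
  | nil => rfl
  | cons s r ih =>
    show (pvWeightsB r).1.insert s ((pvWeightsB r).1.getD s 0 + 1) = _
    rw [ih, List.reverse_cons, PySem.Dict.counter_append_singleton]
    rfl

-- summing the q-indicator over a nodup list containing x picks out x's term
lemma pvSumInd (q : String → Bool) (x : String) : ∀ (S : List String), S.Nodup → x ∈ S →
    (S.map (fun k => if q k ∧ k = x then (1 : Int) else 0)).sum = if q x then 1 else 0 := by
  intro S
  induction S with
  | nil => intro _ h; cases h
  | cons a S ih =>
    intro hnd hmem
    rw [List.map_cons, List.sum_cons]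
    by_cases hax : a = x
    · subst hax
      have hzero : (S.map (fun k => if q k ∧ k = a then (1 : Int) else 0)).sum = 0 := by
        apply List.sum_eq_zero
        intro y hy
        obtain ⟨k, hk, rfl⟩ := List.mem_map.mp hy
        have : k ≠ a := fun h => (List.nodup_cons.mp hnd).1 (h ▸ hk)
        simp [this]
      rw [hzero]
      by_cases hq : q a = true
      · simp [hq]
      · simp [Bool.not_eq_true] at hq; simp [hq]
    · have hmem' : x ∈ S := by
        rcases List.mem_cons.mp hmem with h | h
        · exact absurd h.symm hax
        · exact h
      rw [ih (List.nodup_cons.mp hnd).2 hmem']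
      simp [hax]

-- summing (if q k then count k l) over the distinct values of l is countP q l
lemma pvSumQ (q : String → Bool) : ∀ (l : List String),
    ((PySem.Set.ofList l).map (fun k => if q k then (l.count k : Int) else 0)).sum = (l.countP q : Int) := by
  intro l
  induction l using List.reverseRecOn with
  | nil => simp [PySem.Set.ofList]
  | append_singleton l x ih =>
    rw [PySem.Set.ofList_append_singleton, List.countP_append]
    have hcount : ∀ k : String, (((l ++ [x]).count k : Nat) : Int)
        = ((l.count k : Nat) : Int) + (if k = x then 1 else 0) := by
      intro k
      rw [List.count_append]
      by_cases hk : k = x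
      · subst hk
        rw [List.count_singleton]
        push_cast
        simp
      · rw [List.count_eq_zero.mpr (by simp [hk] : k ∉ [x])]
        simp [hk]
    by_cases hx : x ∈ PySem.Set.ofList l
    · rw [PySem.Set.add_of_mem hx]
      have hmap : (PySem.Set.ofList l).map (fun k => if q k then ((l ++ [x]).count k : Int) else 0)
          = (PySem.Set.ofList l).map (fun k =>
              (if q k then (l.count k : Int) else 0) + (if q k ∧ k = x then (1 : Int) else 0)) := by
        apply List.map_congr_left
        intro k _
        by_cases hq : q k = true
        · rw [if_pos hq, hcount k]
          by_cases hk : k = x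
          · subst hk; simp [hq]
          · simp [hq, hk]
        · simp [Bool.not_eq_true] at hq; simp [hq]
      rw [hmap, PySem.List.sum_map_add_int, ih,
        pvSumInd q x _ (PySem.Set.nodup_ofList l) hx]
      have : l.countP q + List.countP q [x] = l.countP q + (if q x then 1 else 0) := by
        simp [List.countP_cons]
      rw [this]
      push_cast
      by_cases hq : q x = true <;> simp [hq]
    · rw [PySem.Set.add_of_not_mem hx, List.map_append, List.sum_append]
      have hxl : x ∉ l := by
        intro h
        exact hx (by rw [PySem.Set.mem_ofList]; exact h)
      have hmap : (PySem.Set.ofList l).map (fun k => if q k then ((l ++ [x]).count k : Int) else 0)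
          = (PySem.Set.ofList l).map (fun k => if q k then (l.count k : Int) else 0) := by
        apply List.map_congr_left
        intro k hk
        have hkx : k ≠ x := by
          intro h
          rw [PySem.Set.mem_ofList] at hk
          exact hxl (h ▸ hk)
        rw [hcount k, if_neg hkx]
        by_cases hq : q k = true <;> simp [hq]
      rw [hmap, ih]
      have hxc : ((l ++ [x]).count x : Int) = 1 := by
        simp [List.count_append, List.count_eq_zero.mpr hxl]
      simp only [List.map_cons, List.map_nil, List.sum_cons, List.sum_nil, add_zero]
      rw [hxc]
      push_cast
      have hcp : ((List.countP q [x] : Nat) : Int) = if q x then 1 else 0 := by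
        by_cases hq : q x = true <;> simp [hq]
      rw [hcp]

-- turning B's if-guarded accumulation into a sum
lemma pvFoldIfSum (p : String → Bool) : ∀ (L : List (String × Int)),
    L.foldl (fun a q => if p q.1 then a + q.2 else a) 0
    = (L.map (fun q => if p q.1 then q.2 else 0)).sum := by
  intro L
  have hfun : (fun (a : Int) (q : String × Int) => if p q.1 then a + q.2 else a)
      = (fun a q => a + (if p q.1 then q.2 else 0)) := by
    funext a q
    by_cases h : p q.1 = true <;> simp [h]
  rw [hfun, PySem.List.foldl_add, zero_add]

-- the per-index weight B computes is A's aggregated suffix count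
lemma pvWeightsB_snd : ∀ (xs : List String), xs.zip (pvWeightsB xs).2 = prPairs xs := by
  intro xs
  induction xs with
  | nil => rfl
  | cons s r ih =>
    show (s :: r).zip (_ :: (pvWeightsB r).2) = _
    rw [List.zip_cons_cons, ih]
    simp only [prPairs]
    congr 1
    rw [pvWeightsB_fst r, PySem.Dict.items_counter,
      pvFoldIfSum (fun t => t != s && shares_affix s t), List.map_map]
    have hcomp : ((fun q : String × Int => if q.1 != s && shares_affix s q.1 then q.2 else 0)
          ∘ (fun k : String => (k, ((r.reverse.count k : Nat) : Int))))
        = (fun k => if (fun t => t != s && shares_affix s t) k then ((r.reverse.count k : Nat) : Int) else 0) := by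
      funext k
      rfl
    rw [hcomp, pvSumQ, List.countP_reverse]
    have hpred : (fun t => t != s && shares_affix s t) = pvQ s := by
      funext t
      have hsym : (t == s) = (s == t) := by
        by_cases h : t = s
        · subst h; rfl
        · simp [h, Ne.symm h]
      simp only [pvQ, ← affix_pred_eq, bne, hsym]
    rw [hpred]

-- ===== VERDICT (by name: the statement is the Claim_ definition above) =====
theorem find_full_and_partial_matches_spec : Claim_equal_find_full_and_partial_matches := by
  intro strings _
  unfold Spec_find_full_and_partial_matches find_full_and_partial_matches find_full_and_partial_matches_alt
  have hA := outerA_eq strings strings.length 0 (by omega) (PySem.Dict.empty, PySem.Dict.empty)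
  simp only [Nat.cast_zero, List.drop_zero] at hA
  dsimp only
  rw [hA, pvGo_factor]
  refine Prod.ext ?_ ?_
  · show ((eqPairs strings).foldl (fun d p => pvBumpIf d p.1 p.2) PySem.Dict.empty).items = _
    rw [pvAchar strings PySem.Dict.empty (by rw [PySem.Dict.keys_empty]; exact List.nodup_nil)]
    rw [PySem.Dict.foldl_insert_getD_add_one_eq_counter, pvBfull]
    rw [PySem.Dict.keys_empty]
    rfl
  · show ((prPairs strings).foldl (fun d p => pvBumpIf d p.1 p.2) PySem.Dict.empty).items = _
    rw [← pvWeightsB_snd strings]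
    have hf : (fun (d : PySem.Dict String Int) (p : String × Int) =>
        if p.2 != 0 then d.insert p.1 (d.getD p.1 0 + p.2) else d)
        = (fun d p => pvBumpIf d p.1 p.2) := by
      funext d p
      by_cases h : p.2 = 0
      · simp [pvBumpIf, h]
      · simp [pvBumpIf, h]
    rw [hf]
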